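-- pv_equiv track=rewrite | github.com/terrafying/word-manifold | scripts/sacred_audio_explorer.py | generate_fibonacci_rhythm
-- ===== SOURCE A (Python) =====
-- from typing import List, Dict, Tuple, Optional, Union
--
-- def generate_fibonacci_rhythm(length: int) -> List[int]:
--     """Generate rhythm based on Fibonacci sequence."""
--     # Generate Fibonacci numbers up to length
--     fib = [1, 1]
--     while fib[-1] < length:
--         fib.append(fib[-1] + fib[-2])
--
--     # Create rhythm pattern
--     pattern = [0] * length
--     for i in fib:
--         if i < length:
--             pattern[i] = 1
--     return pattern
-- ===== SOURCE B (Python) =====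
-- def generate_fibonacci_rhythm(length: int):
--     """Generate rhythm based on Fibonacci sequence (per-index membership test)."""
--     def is_fib(n):
--         a, b = 1, 2
--         while b <= n:
--             a, b = b, a + b
--         return a == n
--     if length <= 0:
--         return []
--     return [0] + [1 if is_fib(i) else 0 for i in range(1, length)]
-- ===== Notes on version B (the rewrite author's own statement) =====
-- stated objective: alternative
-- what changed: A generates the whole Fibonacci list and marks positions by random-access assignment into a preallocated array; B builds the pattern in one comprehension with a per-index Fibonacci-membership test (descend through consecutive Fibonacci pairs until the candidate is bracketed).
import Mathlib
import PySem

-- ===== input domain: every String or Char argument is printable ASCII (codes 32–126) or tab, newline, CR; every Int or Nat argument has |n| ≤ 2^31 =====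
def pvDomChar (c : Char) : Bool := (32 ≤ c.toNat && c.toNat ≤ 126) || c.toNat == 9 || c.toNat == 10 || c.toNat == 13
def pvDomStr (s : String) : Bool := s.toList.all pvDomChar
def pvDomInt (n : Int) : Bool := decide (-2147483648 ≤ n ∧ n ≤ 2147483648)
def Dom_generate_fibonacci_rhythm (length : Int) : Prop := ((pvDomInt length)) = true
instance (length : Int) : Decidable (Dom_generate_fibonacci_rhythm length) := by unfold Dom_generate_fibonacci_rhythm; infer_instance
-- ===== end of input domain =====

-- B replaces A's generate-Fibonacci-list-then-mark-by-assignment with a one-pass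
-- comprehension using a per-index Fibonacci-membership test (objective: alternative).

-- ===== PORT A =====
-- A's while-loop, carrying the accumulated fib list and its last two entries
-- (fib[-2], fib[-1]) as Nats (every Python value here is a positive integer).
-- The conjunct '1 ≤ prev' only makes the recursion total; it holds in every
-- reachable state, so the computation is exactly Python's.
def pvFibGen (length : Int) (fib : List Nat) (prev last : Nat) : List Nat :=
  if 1 ≤ prev ∧ (last : Int) < length then
    pvFibGen length (fib ++ [prev + last]) last (prev + last)
  else fib
termination_by (length - (last : Int)).toNat
decreasing_by omega

def generate_fibonacci_rhythm (length : Int) : List Int :=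
  let fib := pvFibGen length [1, 1] 1 1
  -- pattern = [0] * length  (empty when length ≤ 0, exactly as in Python)
  let pattern : List Int := List.replicate length.toNat 0
  -- for i in fib: if i < length: pattern[i] = 1   (the index is in range, so
  -- List.set is exactly Python's assignment)
  fib.foldl (fun (p : List Int) (i : Nat) => if (i : Int) < length then p.set i 1 else p) pattern

-- ===== PORT B =====
-- is_fib's while-loop: a, b run over consecutive Fibonacci values until b > n.
-- The conjunct '1 ≤ a' only makes the recursion total; it holds in every
-- reachable state.
def pvIsFibLoop (n a b : Nat) : Bool :=
  if 1 ≤ a ∧ b ≤ n then pvIsFibLoop n b (a + b) else a == n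
termination_by n + 1 - b
decreasing_by omega

def pvIsFib (n : Nat) : Bool := pvIsFibLoop n 1 2

def generate_fibonacci_rhythm_alt (length : Int) : List Int :=
  if length ≤ 0 then []
  else 0 :: (PySem.List.pyRange 1 length 1).map
    (fun i => if pvIsFib i.toNat then 1 else 0)  -- every i in range(1, length) is ≥ 1

-- ===== PRECONDITION & SPEC =====
def Spec_generate_fibonacci_rhythm (length : Int) (out : List Int) : Prop := out = generate_fibonacci_rhythm_alt length
instance (length : Int) (out : List Int) : Decidable (Spec_generate_fibonacci_rhythm length out) := by unfold Spec_generate_fibonacci_rhythm; infer_instance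

-- ===== CLAIM (what is proved, stated in full; the proofs are below) =====
def Claim_equal_generate_fibonacci_rhythm : Prop := ∀ (length : Int), Dom_generate_fibonacci_rhythm length → Spec_generate_fibonacci_rhythm length (generate_fibonacci_rhythm length)

-- ===== LEMMAS AND PROOFS =====

theorem pv_fib_one_le (K : ℕ) (hK : 1 ≤ K) : 1 ≤ Nat.fib K :=
  Nat.fib_pos.mpr hK

-- no Fibonacci value lies strictly between two consecutive Fibonacci values
theorem pv_fib_next (j K : ℕ) (h : Nat.fib K < Nat.fib j) : Nat.fib (K + 1) ≤ Nat.fib j := by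
  have hKj : K < j := by
    by_contra hc
    push Not at hc
    have := Nat.fib_mono hc
    omega
  exact Nat.fib_mono hKj

theorem pvIsFibLoop_iff (n K : ℕ) (hK : 1 ≤ K) (hle : Nat.fib K ≤ n) :
    (pvIsFibLoop n (Nat.fib K) (Nat.fib (K + 1)) = true ↔ ∃ j, Nat.fib j = n) := by
  rw [pvIsFibLoop]
  by_cases h : Nat.fib (K + 1) ≤ n
  · rw [if_pos ⟨pv_fib_one_le K hK, h⟩]
    have h2 : Nat.fib K + Nat.fib (K + 1) = Nat.fib (K + 2) := (Nat.fib_add_two).symm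
    rw [h2]
    exact pvIsFibLoop_iff n (K + 1) (by omega) h
  · rw [if_neg (by intro hc; exact h hc.2)]
    constructor
    · intro hb
      exact ⟨K, by simpa using hb⟩
    · rintro ⟨j, rfl⟩
      have h1 : ¬ Nat.fib K < Nat.fib j := fun hlt => h (pv_fib_next j K hlt)
      have h2 : Nat.fib K = Nat.fib j := by omega
      simp [h2]
termination_by n + 1 - Nat.fib (K + 1)
decreasing_by
  have hp := pv_fib_one_le K hK
  have ha : Nat.fib (K + 1 + 1) = Nat.fib K + Nat.fib (K + 1) := Nat.fib_add_two
  omega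

theorem pvIsFib_iff (n : ℕ) (hn : 1 ≤ n) : pvIsFib n = true ↔ ∃ j, Nat.fib j = n := by
  have h2 : Nat.fib 2 = 1 := by decide
  have h3 : Nat.fib 3 = 2 := by decide
  have := pvIsFibLoop_iff n 2 (by omega) (by omega)
  rw [h2, h3] at this
  exact this

theorem pvFibGen_sound (length : Int) (acc : List Nat) (K : ℕ) (hK : 1 ≤ K)
    (hacc : ∀ x ∈ acc, 1 ≤ x ∧ ∃ j, Nat.fib j = x) :
    ∀ v ∈ pvFibGen length acc (Nat.fib K) (Nat.fib (K + 1)), 1 ≤ v ∧ ∃ j, Nat.fib j = v := by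
  rw [pvFibGen]
  by_cases h : (Nat.fib (K + 1) : Int) < length
  · rw [if_pos ⟨pv_fib_one_le K hK, h⟩]
    have h2 : Nat.fib K + Nat.fib (K + 1) = Nat.fib (K + 2) := (Nat.fib_add_two).symm
    rw [h2]
    refine pvFibGen_sound length _ (K + 1) (by omega) ?_
    intro x hx
    rcases List.mem_append.mp hx with hx | hx
    · exact hacc x hx
    · have : x = Nat.fib (K + 2) := by simpa using hx
      subst this
      exact ⟨pv_fib_one_le _ (by omega), ⟨K + 2, rfl⟩⟩
  · rw [if_neg (by intro hc; exact h hc.2)]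
    exact hacc
termination_by (length - (Nat.fib (K + 1) : Int)).toNat
decreasing_by
  have hp := pv_fib_one_le K hK
  have ha : Nat.fib (K + 1 + 1) = Nat.fib K + Nat.fib (K + 1) := Nat.fib_add_two
  omega

theorem pvFibGen_complete (length : Int) (acc : List Nat) (K : ℕ) (hK : 1 ≤ K)
    (hcomp : ∀ v : ℕ, (∃ j, Nat.fib j = v) → 1 ≤ v → v ≤ Nat.fib (K + 1) → v ∈ acc) :
    ∀ v : ℕ, (∃ j, Nat.fib j = v) → 1 ≤ v → (v : Int) < length →
      v ∈ pvFibGen length acc (Nat.fib K) (Nat.fib (K + 1)) := by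
  rw [pvFibGen]
  by_cases h : (Nat.fib (K + 1) : Int) < length
  · rw [if_pos ⟨pv_fib_one_le K hK, h⟩]
    have h2 : Nat.fib K + Nat.fib (K + 1) = Nat.fib (K + 2) := (Nat.fib_add_two).symm
    rw [h2]
    refine pvFibGen_complete length _ (K + 1) (by omega) ?_
    intro v hv h1 hle
    by_cases hv1 : v ≤ Nat.fib (K + 1)
    · exact List.mem_append.mpr (Or.inl (hcomp v hv h1 hv1))
    · rcases hv with ⟨j, rfl⟩
      have hnx := pv_fib_next j (K + 1) (by omega)
      have e22 : Nat.fib (K + 1 + 1) = Nat.fib (K + 2) := rfl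
      have : Nat.fib j = Nat.fib (K + 2) := by omega
      exact List.mem_append.mpr (Or.inr (by simp [this]))
  · rw [if_neg (by intro hc; exact h hc.2)]
    intro v hv h1 hlt
    exact hcomp v hv h1 (by omega)
termination_by (length - (Nat.fib (K + 1) : Int)).toNat
decreasing_by
  have hp := pv_fib_one_le K hK
  have ha : Nat.fib (K + 1 + 1) = Nat.fib K + Nat.fib (K + 1) := Nat.fib_add_two
  omega

-- the marking fold preserves length
theorem pv_foldl_set_length (length : Int) (l : List Nat) (p : List Int) :
    (l.foldl (fun (p : List Int) (i : Nat) => if (i : Int) < length then p.set i 1 else p) p).length = p.length := by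
  induction l generalizing p with
  | nil => rfl
  | cons i l ih =>
    simp only [List.foldl_cons]
    rw [ih]
    by_cases h : (i : Int) < length
    · simp [h]
    · simp [h]

-- entry j of the marking fold: 1 if some marked index equals j, else unchanged
theorem pv_foldl_set_getElem (length : Int) (l : List Nat) (p : List Int) (j : Nat)
    (hj : j < p.length) (hj' : j < (l.foldl (fun (p : List Int) (i : Nat) => if (i : Int) < length then p.set i 1 else p) p).length) :
    (l.foldl (fun (p : List Int) (i : Nat) => if (i : Int) < length then p.set i 1 else p) p)[j] =
      if (∃ i ∈ l, i = j ∧ (i : Int) < length) then 1 else p[j] := by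
  induction l generalizing p with
  | nil => simp
  | cons i l ih =>
    simp only [List.foldl_cons] at hj' ⊢
    by_cases h : (i : Int) < length
    · simp only [if_pos h] at hj' ⊢
      rw [ih _ (by simpa using hj) hj']
      by_cases hl : ∃ x ∈ l, x = j ∧ (x : Int) < length
      · rw [if_pos hl]
        rcases hl with ⟨x, hx, he⟩
        rw [if_pos ⟨x, List.mem_cons_of_mem _ hx, he⟩]
      · rw [if_neg hl]
        by_cases hij : i = j
        · subst hij
          rw [if_pos ⟨i, List.mem_cons_self, rfl, h⟩]
          exact List.getElem_set_self (by simpa using hj)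
        · rw [List.getElem_set_ne hij]
          have hc : ¬ ∃ x ∈ i :: l, x = j ∧ (x : Int) < length := by
            rintro ⟨x, hx, he⟩
            rcases List.mem_cons.mp hx with rfl | hx
            · exact hij he.1
            · exact hl ⟨x, hx, he⟩
          rw [if_neg hc]
    · simp only [if_neg h] at hj' ⊢
      rw [ih p hj hj']
      have hcond : (∃ x ∈ i :: l, x = j ∧ (x : Int) < length) ↔ ∃ x ∈ l, x = j ∧ (x : Int) < length := by
        constructor
        · rintro ⟨x, hx, he⟩
          rcases List.mem_cons.mp hx with rfl | hx
          · exact absurd he.2 h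
          · exact ⟨x, hx, he⟩
        · rintro ⟨x, hx, he⟩
          exact ⟨x, List.mem_cons_of_mem _ hx, he⟩
      by_cases hl : ∃ x ∈ l, x = j ∧ (x : Int) < length
      · rw [if_pos hl, if_pos (hcond.mpr hl)]
      · rw [if_neg hl, if_neg (fun hc => hl (hcond.mp hc))]

-- membership in A's fib list ↔ B's per-index test, for indices 1 ≤ j < length
theorem pv_mem_iff_isFib (length : Int) (j : Nat) (h1 : 1 ≤ j) (hlt : (j : Int) < length) :
    j ∈ pvFibGen length [1, 1] 1 1 ↔ pvIsFib j = true := by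
  have hf1 : Nat.fib 1 = 1 := by decide
  have hf2 : Nat.fib 2 = 1 := by decide
  have hgen : pvFibGen length [1, 1] 1 1 = pvFibGen length [1, 1] (Nat.fib 1) (Nat.fib 2) := by
    rw [hf1, hf2]
  rw [hgen, pvIsFib_iff j h1]
  constructor
  · intro hm
    exact (pvFibGen_sound length [1, 1] 1 (by omega)
      (by intro x hx; simp at hx; subst hx; exact ⟨by omega, ⟨1, hf1⟩⟩) j hm).2
  · intro hv
    refine pvFibGen_complete length [1, 1] 1 (by omega) ?_ j hv h1 hlt
    intro v _ hv1 hv2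
    rw [hf2] at hv2
    have : v = 1 := by omega
    simp [this]

-- every element of A's fib list is ≥ 1
theorem pv_mem_pos (length : Int) (j : Nat) (hm : j ∈ pvFibGen length [1, 1] 1 1) : 1 ≤ j := by
  have hf1 : Nat.fib 1 = 1 := by decide
  have hf2 : Nat.fib 2 = 1 := by decide
  have hgen : pvFibGen length [1, 1] 1 1 = pvFibGen length [1, 1] (Nat.fib 1) (Nat.fib 2) := by
    rw [hf1, hf2]
  rw [hgen] at hm
  exact (pvFibGen_sound length [1, 1] 1 (by omega)
    (by intro x hx; simp at hx; subst hx; exact ⟨by omega, ⟨1, hf1⟩⟩) j hm).1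

-- ===== VERDICT (by name: the statement is the Claim_ definition above) =====
theorem generate_fibonacci_rhythm_spec : Claim_equal_generate_fibonacci_rhythm := by
  intro length _
  show generate_fibonacci_rhythm length = generate_fibonacci_rhythm_alt length
  unfold generate_fibonacci_rhythm generate_fibonacci_rhythm_alt
  by_cases hneg : length ≤ 0
  · rw [if_pos hneg]
    have h0 : length.toNat = 0 := by omega
    apply List.eq_nil_of_length_eq_zero
    rw [pv_foldl_set_length, h0]
    rfl
  · rw [if_neg hneg]
    push Not at hneg
    have hlenA : (pvFibGen length [1, 1] 1 1 |>.foldl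
        (fun (p : List Int) (i : Nat) => if (i : Int) < length then p.set i 1 else p)
        (List.replicate length.toNat 0)).length = length.toNat := by
      rw [pv_foldl_set_length]; simp
    have hlenB : (0 :: (PySem.List.pyRange 1 length 1).map
        (fun i => if pvIsFib i.toNat then 1 else 0) : List Int).length = length.toNat := by
      simp [PySem.List.length_pyRange_one]
      omega
    apply List.ext_getElem (by rw [hlenA, hlenB])
    intro j hjA hjB
    have hj : j < length.toNat := by rw [hlenA] at hjA; exact hjA
    rw [pv_foldl_set_getElem length _ _ j (by simpa using hj) hjA]
    have hrepl : (List.replicate length.toNat (0 : Int))[j]'(by simpa using hj) = 0 := by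
      simp
    rw [hrepl]
    match j with
    | 0 =>
      have : ¬ ∃ i ∈ pvFibGen length [1, 1] 1 1, i = 0 ∧ (i : Int) < length := by
        rintro ⟨i, hi, rfl, -⟩
        exact absurd (pv_mem_pos length 0 hi) (by omega)
      rw [if_neg this]
      rfl
    | j + 1 =>
      have hjr : j < (length - 1).toNat := by omega
      have hb : (0 :: (PySem.List.pyRange 1 length 1).map
          (fun i => if pvIsFib i.toNat then 1 else 0) : List Int)[j + 1]'hjB =
          (if pvIsFib ((1 + (j : Int)).toNat) then 1 else 0) := by
        rw [List.getElem_cons_succ, List.getElem_map]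
        rw [PySem.List.getElem_pyRange_one]
      rw [hb]
      have ht : (1 + (j : Int)).toNat = j + 1 := by omega
      rw [ht]
      have hlt : ((j + 1 : ℕ) : Int) < length := by omega
      have := pv_mem_iff_isFib length (j + 1) (by omega) hlt
      by_cases hm : (j + 1) ∈ pvFibGen length [1, 1] 1 1
      · rw [if_pos ⟨j + 1, hm, rfl, hlt⟩, if_pos (this.mp hm)]
      · have hnf : ¬ pvIsFib (j + 1) = true := fun hf => hm (this.mpr hf)
        rw [if_neg (by rintro ⟨i, hi, rfl, -⟩; exact hm hi), if_neg hnf]
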